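-- pv_equiv track=rewrite | github.com/palmerjh/thermo_final | walker.py | recursiveHelper
-- ===== SOURCE A (Python) =====
-- def recursiveHelper(level,visited):
--     x,y = visited[-1]
--     if level == 0:
--         # euclidean distance of final location
--         return [(x**2 + y**2)]
--
--     distances = []
--     nWalks = 0
--     poss_moves = [  (x,y+1),
--                     (x+1,y),
--                     (x,y-1),
--                     (x-1,y)]
--     for move in poss_moves:
--         if move not in visited:
--             distances += recursiveHelper(level-1,visited + [move])
--
--     return distances
-- ===== SOURCE B (Python) =====
-- def recursiveHelper(level, visited):
--     # iterative DFS with an explicit stack of (visited_list, remaining_level) frames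
--     results = []
--     stack = [(visited, level)]
--     while stack:
--         vis, rem = stack.pop()
--         x, y = vis[-1]
--         if rem == 0:
--             results.append(x**2 + y**2)
--             continue
--         children = [m for m in ((x, y+1), (x+1, y), (x, y-1), (x-1, y))
--                     if m not in vis]
--         for m in reversed(children):
--             stack.append((vis + [m], rem - 1))
--     return results
-- ===== Notes on version B (the rewrite author's own statement) =====
-- stated objective: alternative
-- what changed: Replaced the recursive DFS by an iterative loop over an explicit stack of (visited, remaining_level) frames, pushing children reversed so LIFO popping reproduces A's up-right-down-left pre-order.
import Mathlib
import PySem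

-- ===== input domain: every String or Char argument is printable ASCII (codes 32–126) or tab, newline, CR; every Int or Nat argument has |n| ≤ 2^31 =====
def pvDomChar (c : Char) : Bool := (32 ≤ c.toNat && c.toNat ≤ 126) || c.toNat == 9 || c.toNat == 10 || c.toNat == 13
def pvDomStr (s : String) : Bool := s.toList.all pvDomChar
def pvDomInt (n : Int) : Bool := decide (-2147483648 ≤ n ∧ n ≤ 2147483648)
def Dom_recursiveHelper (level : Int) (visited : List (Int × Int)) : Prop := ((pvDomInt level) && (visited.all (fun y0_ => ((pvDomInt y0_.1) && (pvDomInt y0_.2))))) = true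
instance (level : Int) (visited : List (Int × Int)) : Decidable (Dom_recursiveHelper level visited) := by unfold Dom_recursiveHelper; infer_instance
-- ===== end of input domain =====

-- B replaces A's recursive DFS by an iterative loop over an explicit stack of
-- (visited, remaining_level) frames (same pre-order output); alternative decomposition, no speed claim.

-- ===== PORT A =====
-- last point of the walk: visited[-1] (IndexError on [], which Pre_ excludes)
def lastPt (visited : List (Int × Int)) : Int × Int :=
  (PySem.List.pyGet? visited (-1)).getD (0, 0)

-- A recurses on `level`; the port recurses on level.toNat, which coincides with A
-- wherever A returns (Pre_ requires 0 ≤ level; Python A never returns for negative level).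
def recAN : Nat → List (Int × Int) → List Int
  | 0, visited =>
      [(lastPt visited).1 ^ 2 + (lastPt visited).2 ^ 2]
  | r + 1, visited =>
      -- poss_moves in A's order: up, right, down, left; the for-loop is a foldl
      [((lastPt visited).1, (lastPt visited).2 + 1),
       ((lastPt visited).1 + 1, (lastPt visited).2),
       ((lastPt visited).1, (lastPt visited).2 - 1),
       ((lastPt visited).1 - 1, (lastPt visited).2)].foldl
        (fun distances move =>
          if move ∈ visited then distances
          else distances ++ recAN r (visited ++ [move]))
        []

def recursiveHelper (level : Int) (visited : List (Int × Int)) : List Int :=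
  recAN level.toNat visited

-- ===== PORT B =====
-- termination measure lemma for the stack loop (cited by name in decreasing_by)
theorem pvMeasureLt (ms : List (Int × Int)) (g : Int × Int → List (Int × Int)) (r : Nat)
    (v : List (Int × Int)) (rest : List (List (Int × Int) × Nat)) (h4 : ms.length ≤ 4) :
    ((ms.map (fun m => (g m, r)) ++ rest).map (fun f => 5 ^ f.2)).sum
      < (((v, r + 1) :: rest).map (fun f => 5 ^ f.2)).sum := by
  simp only [List.map_append, List.sum_append, List.map_cons, List.sum_cons, List.map_map]
  have hconst : (ms.map ((fun f : List (Int × Int) × Nat => 5 ^ f.2) ∘ fun m => (g m, r))).sum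
      = ms.length * 5 ^ r := by
    clear h4
    induction ms with
    | nil => simp
    | cons a l ih => simp [ih]; ring
  rw [hconst]
  have h5 : (5 : Nat) ^ (r + 1) = 5 * 5 ^ r := by ring
  have hpos : 0 < (5 : Nat) ^ r := pow_pos (by norm_num) r
  have hm : ms.length * 5 ^ r ≤ 4 * 5 ^ r := Nat.mul_le_mul_right _ h4
  omega

-- explicit stack of frames; the head of the list is the top of Source B's stack
-- (Source B pushes the surviving children reversed, so popping yields them in order)
def loopB : List (List (Int × Int) × Nat) → List Int → List Int
  | [], results => results
  | (vis, 0) :: rest, results =>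
      loopB rest (results ++ [(vis.getLast?.getD (0, 0)).1 ^ 2 + (vis.getLast?.getD (0, 0)).2 ^ 2])
  | (vis, r + 1) :: rest, results =>
      loopB
        ((([((vis.getLast?.getD (0, 0)).1, (vis.getLast?.getD (0, 0)).2 + 1),
            ((vis.getLast?.getD (0, 0)).1 + 1, (vis.getLast?.getD (0, 0)).2),
            ((vis.getLast?.getD (0, 0)).1, (vis.getLast?.getD (0, 0)).2 - 1),
            ((vis.getLast?.getD (0, 0)).1 - 1, (vis.getLast?.getD (0, 0)).2)].filter
             (fun m => m ∉ vis)).map (fun m => (vis ++ [m], r))) ++ rest)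
        results
  termination_by S _ => (S.map (fun f => 5 ^ f.2)).sum
  decreasing_by
  · simp
  · exact pvMeasureLt _ _ r vis rest (le_trans (List.length_filter_le _ _) (by simp))

def recursiveHelper_alt (level : Int) (visited : List (Int × Int)) : List Int :=
  loopB [(visited, level.toNat)] []

-- ===== PRECONDITION & SPEC =====
-- A raises IndexError on visited = [] and never returns (recursion-limit blowup)
-- for level < 0; Pre_ excludes exactly those inputs.
def Pre_recursiveHelper (level : Int) (visited : List (Int × Int)) : Prop :=
  visited ≠ [] ∧ 0 ≤ level
instance (level : Int) (visited : List (Int × Int)) : Decidable (Pre_recursiveHelper level visited) := by unfold Pre_recursiveHelper; infer_instance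
def pvWitness_recursiveHelper : Int × (List (Int × Int)) := (2, [(0, 0)])

def Spec_recursiveHelper (level : Int) (visited : List (Int × Int)) (out : List Int) : Prop := out = recursiveHelper_alt level visited
instance (level : Int) (visited : List (Int × Int)) (out : List Int) : Decidable (Spec_recursiveHelper level visited out) := by unfold Spec_recursiveHelper; infer_instance

-- ===== CLAIM (what is proved, stated in full; the proofs are below) =====
def Claim_equal_recursiveHelper : Prop := ∀ (level : Int) (visited : List (Int × Int)), Dom_recursiveHelper level visited → Pre_recursiveHelper level visited → Spec_recursiveHelper level visited (recursiveHelper level visited)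

-- ===== LEMMAS AND PROOFS =====

-- A's for-loop accumulator equals a flatMap over the surviving moves.
theorem foldl_if_append_flatMap (vis : List (Int × Int))
    (f : Int × Int → List Int) :
    ∀ (ms : List (Int × Int)) (init : List Int),
      ms.foldl (fun acc m => if m ∈ vis then acc else acc ++ f m) init
        = init ++ (ms.filter (fun m => m ∉ vis)).flatMap f := by
  intro ms
  induction ms with
  | nil => intro init; simp
  | cons a l ih =>
      intro init
      by_cases h : a ∈ vis <;> simp [List.foldl_cons, h, ih]

theorem recAN_succ (r : Nat) (visited : List (Int × Int)) :
    recAN (r + 1) visited =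
      ([((lastPt visited).1, (lastPt visited).2 + 1),
        ((lastPt visited).1 + 1, (lastPt visited).2),
        ((lastPt visited).1, (lastPt visited).2 - 1),
        ((lastPt visited).1 - 1, (lastPt visited).2)].filter
          (fun m => m ∉ visited)).flatMap (fun m => recAN r (visited ++ [m])) := by
  rw [recAN]
  exact foldl_if_append_flatMap visited (fun m => recAN r (visited ++ [m])) _ []

-- the stack loop of B computes, in order, A's result for each frame
theorem loopB_flatMap :
    ∀ (S : List (List (Int × Int) × Nat)) (results : List Int),
      loopB S results = results ++ S.flatMap (fun f => recAN f.2 f.1) := by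
  intro S results
  induction S, results using loopB.induct with
  | case1 results => simp [loopB]
  | case2 vis rest results ih =>
      rw [loopB, ih]
      simp [recAN, lastPt, PySem.List.pyGet?_neg_one, List.append_assoc]
  | case3 vis r rest results ih =>
      rw [loopB, ih, List.flatMap_append, List.flatMap_cons, recAN_succ,
        List.flatMap_map, ← List.append_assoc]
      simp [lastPt, PySem.List.pyGet?_neg_one]

-- ===== VERDICT (by name: the statement is the Claim_ definition above) =====
theorem recursiveHelper_spec : Claim_equal_recursiveHelper := by
  intro level visited _ _
  unfold Spec_recursiveHelper recursiveHelper recursiveHelper_alt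
  rw [loopB_flatMap]
  simp
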